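/- GENERATED by mk_final_copies.py from the proof of the farm's unit `start_decoder.R14` (farm:start_decoder.R14.2: Proof.lean) as the
   re-elaboration sweep compiled it — do not edit. -/
import Asan.CheckWalk
import Vorbis.Spec.Units.start_decoder_R14
import Vorbis.Spec.Worked.start_decoder_R14_Lemmas

open X86 X86.User Asan Vorbis Vorbis.Spec Vorbis.Spec.StartDecoder

set_option maxRecDepth 4000
set_option maxHeartbeats 1000000

namespace Vorbis.Spec.start_decoder_R14

/-- **Segment R14 of `start_decoder`** (0x11655f – 0x116657, C lines 4144 – 4151 and the `++i` of 4143): from `BodyR14` (the mode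
loop's invariant with `i < mode_count`) to the loop head with `i + 1` (`AtR13`) or to the error exit (`AtERR`). The five stages of
work/Lemmas.lean — one per returned `get_bits`, the last one with the three tests — chained: each stage takes its continuation as
the hypothesis `hnext`. -/
theorem seg (Lay : Layout) (hLay : Lay.hi = 0x1000000) (μ : Microarch) (hμ : UserX.MicroOK μ) (u₀ : State)
    (hcode : HasCodeNat Lay u₀ Vorbis.L.start_decoder.entry Vorbis.Code.code_start_decoder.nat Vorbis.L.start_decoder.size)
    (g : Ghost) (i : Nat) (A : Arena × List Obj) (v : State)
    (hgb : Calls Lay μ Vorbis.WayInv (Vorbis.conv u₀) Vorbis.L.get_bits.entry (get_bits.spec A.2 g.frames' (g.Blk A) g.len))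
    (hst1 : Asan.SmallCheck Lay μ Vorbis.WayInv (Vorbis.CodeOK u₀) [.rax, .rdx] 1 Vorbis.L.__asan_store1_noabort.entry)
    (hst2 : Asan.SmallCheck Lay μ Vorbis.WayInv (Vorbis.CodeOK u₀) [.rax, .rcx, .rdx] 2 Vorbis.L.__asan_store2_noabort.entry)
    (hld2 : Asan.SmallCheck Lay μ Vorbis.WayInv (Vorbis.CodeOK u₀) [.rax, .rcx, .rdx] 2 Vorbis.L.__asan_load2_noabort.entry)
    (herr : Calls Lay μ Vorbis.WayInv (Vorbis.conv u₀) Vorbis.L.error.entry (error.spec A.2 g.frames'))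
    (hld4 : Asan.SmallCheck Lay μ Vorbis.WayInv (Vorbis.CodeOK u₀) [.rax, .rcx, .rdx] 4 Vorbis.L.__asan_load4_noabort.entry)
    (hbody : BodyR14 u₀ g i A v) :
    ReachVia Lay μ Vorbis.WayInv v (fun w => AtR13 u₀ g (i + 1) w ∨ AtERR u₀ g w) := by
  have hloop := hbody.loop
  have hfr := hloop.frame
  have hh := hloop.hand
  -- 0x11655f … 0x11657b: `m = f->mode_config + i`, `get_bits(f, 1)`
  refine stage1 Lay hLay μ hμ u₀ hcode g i A v hgb hloop hbody.lt _ ?_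
  intro s1 h1 hrax
  -- … 0x116596: `m->blockflag = …`, `get_bits(f, 16)`
  refine stage2 Lay hLay μ hμ u₀ hcode g i A v hgb hst1 hfr hh _ s1 h1 hrax ?_
  intro s2 h2 hbf2
  -- … 0x1165b7: `m->windowtype = …`, `get_bits(f, 16)`
  refine stage3 Lay hLay μ hμ u₀ hcode g i A v hgb hst2 hfr hh _ s2 h2 hbf2 ?_
  intro s3 h3 hbf3 hr13
  -- … 0x1165d5: `m->transformtype = …`, `get_bits(f, 8)`
  refine stage4 Lay hLay μ hμ u₀ hcode g i A v hgb hst2 hfr hh _ s3 h3 hbf3 hr13 ?_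
  intro s4 h4 hbf4 hr13'
  -- … 0x116657: `m->mapping = …`, the three tests, `++i`
  exact stage5 Lay hLay μ hμ u₀ hcode g i A v hst1 hld2 herr hld4 hfr hh s4 h4 hbf4 hr13'

end Vorbis.Spec.start_decoder_R14

/-- Unit `start_decoder.R14`: segment R14 of `start_decoder` takes its entry assertion to one of its exit assertions. -/
theorem Vorbis.Spec.Worked.start_decoder_R14_ok : Vorbis.Spec.start_decoder_R14.Statement := by
  unfold Vorbis.Spec.start_decoder_R14.Statement
  intro Lay hLay μ hμ u₀ hcode h_get_bits hst1 hst2 hld2 h_error hld4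
  intro g i v hat
  obtain ⟨A, hbody⟩ := hat
  have hgb := h_get_bits A.2 g.frames' (g.Blk A) g.len
  have herr := h_error A.2 g.frames'
  exact Vorbis.Spec.start_decoder_R14.seg Lay hLay μ hμ u₀ hcode g i A v hgb hst1 hst2 hld2 herr hld4 hbody
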